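-- pv_equiv track=rewrite | github.com/Dgeorgealex/PP2023_A5 | Lab2/Ex9.py | see_not
-- ===== SOURCE A (Python) =====
-- def see_not(matrix):
--     n = len(matrix)
--     m = len(matrix[0])
--     max_height = [0] * m
--     pos_list = []
--
--     for i in range(n):
--         for j in range(m):
--             if matrix[i][j] <= max_height[j]:
--                 pos_list.append((i, j))
--             else:
--                 max_height[j] = matrix[i][j]
--
--     return pos_list
-- ===== SOURCE B (Python) =====
-- def see_not(matrix):
--     m = len(matrix[0])
--     pmax = []
--     cur = [0] * m
--     for row in matrix:
--         pmax.append(cur)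
--         cur = [max(c, row[j]) for j, c in enumerate(cur)]
--     return [(i, j) for i, row in enumerate(matrix) for j in range(m)
--             if row[j] <= pmax[i][j]]
-- ===== Notes on version B (the rewrite author's own statement) =====
-- stated objective: alternative
-- what changed: Replaces the fused loop that mutates a running max_height array while collecting positions with two separate passes: first a precomputed per-column prefix-maximum table (row i holds the column maxima strictly above row i, starting from 0), then a comprehension that collects (i,j) where matrix[i][j] <= pmax[i][j].
import Mathlib
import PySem

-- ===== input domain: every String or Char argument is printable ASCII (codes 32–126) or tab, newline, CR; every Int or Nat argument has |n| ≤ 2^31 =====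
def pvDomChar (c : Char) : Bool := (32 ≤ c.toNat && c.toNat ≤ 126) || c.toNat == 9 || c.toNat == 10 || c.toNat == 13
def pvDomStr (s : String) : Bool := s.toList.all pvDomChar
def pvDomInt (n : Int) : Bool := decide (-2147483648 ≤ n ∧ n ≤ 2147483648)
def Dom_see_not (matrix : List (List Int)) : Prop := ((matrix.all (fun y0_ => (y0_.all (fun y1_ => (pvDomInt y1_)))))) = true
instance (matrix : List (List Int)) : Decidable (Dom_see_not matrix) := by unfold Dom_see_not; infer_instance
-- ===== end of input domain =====

-- B separates A's fused mutate-and-collect loop into two passes: a precomputed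
-- per-column prefix-maximum table, then a pure collection pass (alternative
-- decomposition, same asymptotic cost; return value only, no mutation involved).

-- ===== PORT A =====
-- literal transliteration of A: outer loop over row indices, inner loop over
-- column indices, state = (max_height list, pos_list); `set` mirrors the
-- in-place assignment max_height[j] = matrix[i][j].
def see_not (matrix : List (List Int)) : List (Int × Int) :=
  let n := matrix.length
  let m := (matrix.headD []).length
  (((List.range n).foldl (fun st i =>
      (List.range m).foldl (fun (st : List Int × List (Int × Int)) j =>
        if (matrix.getD i []).getD j 0 ≤ st.1.getD j 0 then
          (st.1, st.2 ++ [((i : Int), (j : Int))])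
        else
          (st.1.set j ((matrix.getD i []).getD j 0), st.2)) st)
    ((List.replicate m 0 : List Int), ([] : List (Int × Int))))).2

-- ===== PORT B =====
-- literal transliteration of B: first pass builds the prefix-maximum table
-- pmax (pmax[i][j] = max of 0 and column j strictly above row i), second pass
-- is the comprehension collecting qualifying positions.
def see_not_alt (matrix : List (List Int)) : List (Int × Int) :=
  let m := (matrix.headD []).length
  let pmax := (matrix.foldl (fun (acc : List (List Int) × List Int) row =>
      (acc.1 ++ [acc.2],
       acc.2.zipIdx.map (fun p => max p.1 (row.getD p.2 0))))
    (([] : List (List Int)), (List.replicate m 0 : List Int))).1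
  matrix.zipIdx.flatMap (fun ri =>
    (List.range m).filterMap (fun j =>
      if ri.1.getD j 0 ≤ (pmax.getD ri.2 []).getD j 0 then
        some ((ri.2 : Int), (j : Int))
      else none))

-- ===== PRECONDITION & SPEC =====
-- Pre_ excludes exactly the inputs where Python A raises IndexError: the empty
-- matrix (matrix[0]) and matrices with some row shorter than the first row
-- (matrix[i][j] for j < len(matrix[0])).
def Pre_see_not (matrix : List (List Int)) : Prop :=
  matrix ≠ [] ∧ ∀ row ∈ matrix, (matrix.headD []).length ≤ row.length
instance (matrix : List (List Int)) : Decidable (Pre_see_not matrix) := by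
  unfold Pre_see_not; infer_instance
def pvWitness_see_not : List (List Int) := [[1, 2], [0, 3]]

def Spec_see_not (matrix : List (List Int)) (out : List (Int × Int)) : Prop := out = see_not_alt matrix
instance (matrix : List (List Int)) (out : List (Int × Int)) : Decidable (Spec_see_not matrix out) := by unfold Spec_see_not; infer_instance

-- ===== CLAIM (what is proved, stated in full; the proofs are below) =====
def Claim_equal_see_not : Prop := ∀ (matrix : List (List Int)), Dom_see_not matrix → Pre_see_not matrix → Spec_see_not matrix (see_not matrix)

-- ===== LEMMAS AND PROOFS =====

-- pointwise max of the running column maxima with a row (width m)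
def pvNh (m : Nat) (h row : List Int) : List Int :=
  (List.range m).map (fun j => max (h.getD j 0) (row.getD j 0))

-- positions contributed by row `row` at row index `i` given column maxima `h`
def pvRowPos (m : Nat) (i : Nat) (h row : List Int) : List (Int × Int) :=
  (List.range m).filterMap (fun j =>
    if row.getD j 0 ≤ h.getD j 0 then some ((i : Int), (j : Int)) else none)

-- reference recursion both ports are reduced to
def pvSpec (m : Nat) : List Int → Nat → List (List Int) → List (Int × Int)
  | _, _, [] => []
  | h, i, row :: rest => pvRowPos m i h row ++ pvSpec m (pvNh m h row) (i + 1) rest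

-- prefix-maximum table as a recursion on rows
def pvPfx (m : Nat) : List Int → List (List Int) → List (List Int)
  | _, [] => []
  | h, row :: rest => h :: pvPfx m (pvNh m h row) rest

theorem pvNh_length (m : Nat) (h row : List Int) : (pvNh m h row).length = m := by
  simp [pvNh]

theorem flatMap_congr_mem {α β : Type} (l : List α) (f g : α → List β)
    (h : ∀ a ∈ l, f a = g a) : l.flatMap f = l.flatMap g := by
  induction l with
  | nil => rfl
  | cons x xs ih =>
    simp only [List.flatMap_cons, h x (by simp), ih (fun a ha => h a (by simp [ha]))]

theorem zipIdx_map_max (m : Nat) (h row : List Int) (hm : h.length = m) :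
    h.zipIdx.map (fun p => max p.1 (row.getD p.2 0)) = pvNh m h row := by
  apply List.ext_getElem
  · simp [pvNh, hm]
  · intro j h1 h2
    have hj : j < h.length := by simpa using h1
    have hjm : j < m := by omega
    simp only [List.getElem_map, List.getElem_zipIdx, pvNh, List.getElem_range, Nat.zero_add]
    rw [List.getD_eq_getElem h 0 hj]

theorem pvSpec_inner (row h0 : List Int) (i : Nat) :
    ∀ (k a : Nat) (h : List Int) (pos : List (Int × Int)),
      h.length = h0.length →
      a + k ≤ h0.length →
      (∀ j, a ≤ j → h.getD j 0 = h0.getD j 0) →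
      (((List.range' a k).foldl (fun (st : List Int × List (Int × Int)) j =>
        if row.getD j 0 ≤ st.1.getD j 0 then
          (st.1, st.2 ++ [((i : Int), (j : Int))])
        else
          (st.1.set j (row.getD j 0), st.2)) (h, pos)).1.length = h0.length ∧
      (∀ j, ((List.range' a k).foldl (fun (st : List Int × List (Int × Int)) j =>
        if row.getD j 0 ≤ st.1.getD j 0 then
          (st.1, st.2 ++ [((i : Int), (j : Int))])
        else
          (st.1.set j (row.getD j 0), st.2)) (h, pos)).1.getD j 0 =
        if a ≤ j ∧ j < a + k then max (h0.getD j 0) (row.getD j 0) else h.getD j 0) ∧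
      ((List.range' a k).foldl (fun (st : List Int × List (Int × Int)) j =>
        if row.getD j 0 ≤ st.1.getD j 0 then
          (st.1, st.2 ++ [((i : Int), (j : Int))])
        else
          (st.1.set j (row.getD j 0), st.2)) (h, pos)).2 =
        pos ++ (List.range' a k).filterMap (fun j =>
          if row.getD j 0 ≤ h0.getD j 0 then some ((i : Int), (j : Int)) else none)) := by
  intro k
  induction k with
  | zero =>
    intro a h pos hl _ _
    refine ⟨hl, fun j => ?_, by simp⟩
    simp only [List.range'_zero, List.foldl_nil]
    have : ¬(a ≤ j ∧ j < a + 0) := by omega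
    rw [if_neg this]
  | succ k ih =>
    intro a h pos hl hk hagree
    rw [List.range'_succ]
    simp only [List.foldl_cons]
    by_cases hc : row.getD a 0 ≤ h.getD a 0
    · rw [if_pos hc]
      obtain ⟨L, G, P⟩ := ih (a + 1) h (pos ++ [((i : Int), (a : Int))]) hl (by omega)
        (fun j hj => hagree j (by omega))
      have hcond : row.getD a 0 ≤ h0.getD a 0 := by rw [← hagree a le_rfl]; exact hc
      refine ⟨L, fun j => ?_, ?_⟩
      · rw [G j]
        split_ifs with h1 h2 h2
        · rfl
        · omega
        · have hja : j = a := by omega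
          subst hja
          rw [hagree j le_rfl]
          exact (max_eq_left hcond).symm
        · rfl
      · rw [P, List.filterMap_cons, if_pos hcond]
        simp
    · rw [if_neg hc]
      have hcond : ¬ row.getD a 0 ≤ h0.getD a 0 := by rw [← hagree a le_rfl]; exact hc
      have haltm : a < h.length := by omega
      have hl' : (h.set a (row.getD a 0)).length = h0.length := by
        rw [List.length_set]; exact hl
      have hgetne : ∀ j, j ≠ a → (h.set a (row.getD a 0)).getD j 0 = h.getD j 0 := by
        intro j hj
        rw [List.getD_eq_getElem?_getD, List.getElem?_set_ne (fun e => hj e.symm),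
          ← List.getD_eq_getElem?_getD]
      obtain ⟨L, G, P⟩ := ih (a + 1) (h.set a (row.getD a 0)) pos hl' (by omega)
        (fun j hj => by rw [hgetne j (by omega)]; exact hagree j (by omega))
      refine ⟨L, fun j => ?_, ?_⟩
      · rw [G j]
        split_ifs with h1 h2 h2
        · rfl
        · omega
        · have hja : j = a := by omega
          subst hja
          rw [List.getD_eq_getElem?_getD, List.getElem?_set_self haltm]
          have hlt : h0.getD j 0 < row.getD j 0 := by
            rw [← hagree j le_rfl]; omega
          simp only [Option.getD_some]
          exact (max_eq_right (le_of_lt hlt)).symm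
        · exact hgetne j (by omega)
      · rw [P, List.filterMap_cons, if_neg hcond]

theorem pvSpec_inner_m (row : List Int) (i m : Nat) (h : List Int) (pos : List (Int × Int))
    (hl : h.length = m) :
    (((List.range m).foldl (fun (st : List Int × List (Int × Int)) j =>
        if row.getD j 0 ≤ st.1.getD j 0 then
          (st.1, st.2 ++ [((i : Int), (j : Int))])
        else
          (st.1.set j (row.getD j 0), st.2)) (h, pos)).1.length = m ∧
      (∀ j, ((List.range m).foldl (fun (st : List Int × List (Int × Int)) j =>
        if row.getD j 0 ≤ st.1.getD j 0 then
          (st.1, st.2 ++ [((i : Int), (j : Int))])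
        else
          (st.1.set j (row.getD j 0), st.2)) (h, pos)).1.getD j 0 =
        if 0 ≤ j ∧ j < 0 + m then max (h.getD j 0) (row.getD j 0) else h.getD j 0) ∧
      ((List.range m).foldl (fun (st : List Int × List (Int × Int)) j =>
        if row.getD j 0 ≤ st.1.getD j 0 then
          (st.1, st.2 ++ [((i : Int), (j : Int))])
        else
          (st.1.set j (row.getD j 0), st.2)) (h, pos)).2 =
        pos ++ pvRowPos m i h row) := by
  have := pvSpec_inner row h i m 0 h pos rfl (by omega) (fun _ _ => rfl)
  rw [List.range_eq_range']
  simpa [pvRowPos, List.range_eq_range', hl] using this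

theorem pvSpec_A (matrix : List (List Int)) (m : Nat) :
    ∀ (k i0 : Nat) (h : List Int) (pos : List (Int × Int)),
      h.length = m →
      i0 + k ≤ matrix.length →
      (((List.range' i0 k).foldl (fun st i =>
        (List.range m).foldl (fun (st : List Int × List (Int × Int)) j =>
          if (matrix.getD i []).getD j 0 ≤ st.1.getD j 0 then
            (st.1, st.2 ++ [((i : Int), (j : Int))])
          else
            (st.1.set j ((matrix.getD i []).getD j 0), st.2)) st) (h, pos)).2 =
        pos ++ pvSpec m h i0 ((matrix.drop i0).take k)) := by
  intro k
  induction k with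
  | zero => intro i0 h pos hl _; simp [pvSpec]
  | succ k ih =>
    intro i0 h pos hl hk
    rw [List.range'_succ]
    simp only [List.foldl_cons]
    have hi0 : i0 < matrix.length := by omega
    obtain ⟨L, G, P⟩ := pvSpec_inner_m (matrix.getD i0 []) i0 m h pos hl
    have hst1 : ((List.range m).foldl (fun (st : List Int × List (Int × Int)) j =>
        if (matrix.getD i0 []).getD j 0 ≤ st.1.getD j 0 then
          (st.1, st.2 ++ [((i0 : Int), (j : Int))])
        else
          (st.1.set j ((matrix.getD i0 []).getD j 0), st.2)) (h, pos)).1.length = m := by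
      exact L
    have key := ih (i0 + 1)
      ((List.range m).foldl (fun (st : List Int × List (Int × Int)) j =>
        if (matrix.getD i0 []).getD j 0 ≤ st.1.getD j 0 then
          (st.1, st.2 ++ [((i0 : Int), (j : Int))])
        else
          (st.1.set j ((matrix.getD i0 []).getD j 0), st.2)) (h, pos)).1
      ((List.range m).foldl (fun (st : List Int × List (Int × Int)) j =>
        if (matrix.getD i0 []).getD j 0 ≤ st.1.getD j 0 then
          (st.1, st.2 ++ [((i0 : Int), (j : Int))])
        else
          (st.1.set j ((matrix.getD i0 []).getD j 0), st.2)) (h, pos)).2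
      hst1 (by omega)
    rw [Prod.mk.eta] at key
    rw [key, P]
    clear key
    have hX1 : ((List.range m).foldl (fun (st : List Int × List (Int × Int)) j =>
        if (matrix.getD i0 []).getD j 0 ≤ st.1.getD j 0 then
          (st.1, st.2 ++ [((i0 : Int), (j : Int))])
        else
          (st.1.set j ((matrix.getD i0 []).getD j 0), st.2)) (h, pos)).1 =
        pvNh m h (matrix.getD i0 []) := by
      apply List.ext_getElem
      · rw [L, pvNh_length]
      · intro j hj1 hj2
        have hjm : j < m := by rw [pvNh_length] at hj2; exact hj2
        have hG := G j
        rw [if_pos (⟨Nat.zero_le j, by omega⟩ : 0 ≤ j ∧ j < 0 + m)] at hG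
        rw [← List.getD_eq_getElem _ 0 hj1, ← List.getD_eq_getElem _ 0 hj2, hG]
        simp [pvNh, List.getD_eq_getElem?_getD, hjm]
    rw [hX1]
    have hdrop : matrix.drop i0 = matrix[i0] :: matrix.drop (i0 + 1) :=
      List.drop_eq_getElem_cons hi0
    have hrow : matrix.getD i0 [] = matrix[i0] := List.getD_eq_getElem matrix [] hi0
    rw [hdrop, List.take_succ_cons]
    simp only [pvSpec, hrow, List.append_assoc]

theorem pvPfx_build (m : Nat) :
    ∀ (rows : List (List Int)) (acc : List (List Int)) (h : List Int),
      h.length = m →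
      ((rows.foldl (fun (acc : List (List Int) × List Int) row =>
        (acc.1 ++ [acc.2],
         acc.2.zipIdx.map (fun p => max p.1 (row.getD p.2 0)))) (acc, h)).1 =
        acc ++ pvPfx m h rows) := by
  intro rows
  induction rows with
  | nil => intro acc h _; simp [pvPfx]
  | cons row rest ih =>
    intro acc h hm
    simp only [List.foldl_cons, pvPfx]
    rw [zipIdx_map_max m h row hm, ih (acc ++ [h]) (pvNh m h row) (pvNh_length m h row)]
    simp

theorem pvSpec_B (m : Nat) :
    ∀ (rows : List (List Int)) (h : List Int) (i0 : Nat),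
      ((rows.zipIdx i0).flatMap (fun ri =>
        (List.range m).filterMap (fun j =>
          if ri.1.getD j 0 ≤ ((pvPfx m h rows).getD (ri.2 - i0) []).getD j 0 then
            some ((ri.2 : Int), (j : Int))
          else none)) = pvSpec m h i0 rows) := by
  intro rows
  induction rows with
  | nil => intro h i0; simp [pvSpec]
  | cons row rest ih =>
    intro h i0
    rw [List.zipIdx_cons, List.flatMap_cons]
    have hcongr : ∀ ri ∈ rest.zipIdx (i0 + 1),
        (List.range m).filterMap (fun j =>
          if ri.1.getD j 0 ≤ ((pvPfx m h (row :: rest)).getD (ri.2 - i0) []).getD j 0 then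
            some ((ri.2 : Int), (j : Int))
          else none) =
        (List.range m).filterMap (fun j =>
          if ri.1.getD j 0 ≤ ((pvPfx m (pvNh m h row) rest).getD (ri.2 - (i0 + 1)) []).getD j 0 then
            some ((ri.2 : Int), (j : Int))
          else none) := by
      intro ri hri
      have hge : i0 + 1 ≤ ri.2 := by
        have := List.mem_zipIdx hri
        omega
      have hsub : ri.2 - i0 = (ri.2 - (i0 + 1)) + 1 := by omega
      rw [hsub]
      simp [pvPfx]
    rw [flatMap_congr_mem _ _ _ hcongr, ih (pvNh m h row) (i0 + 1)]
    simp [pvSpec, pvRowPos, pvPfx]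

-- ===== VERDICT (by name: the statement is the Claim_ definition above) =====
theorem see_not_spec : Claim_equal_see_not := by
  intro matrix _ _
  unfold Spec_see_not see_not see_not_alt
  dsimp only
  have hA := pvSpec_A matrix (matrix.headD []).length matrix.length 0
    (List.replicate (matrix.headD []).length 0) [] (by simp) (by omega)
  rw [← List.range_eq_range'] at hA
  simp only [List.drop_zero, List.take_length, List.nil_append] at hA
  rw [hA]
  have hP := pvPfx_build (matrix.headD []).length matrix []
    (List.replicate (matrix.headD []).length 0) (by simp)
  rw [hP, List.nil_append]
  have hB := pvSpec_B (matrix.headD []).length matrix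
    (List.replicate (matrix.headD []).length 0) 0
  simp only [Nat.sub_zero] at hB
  exact hB.symm
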